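-- pv_equiv track=rewrite | github.com/anthonycurtisadler/wordl_solver | wordl.py | proper_first_word
-- ===== SOURCE A (Python) =====
-- def proper_first_word (word):
--
--      if len(set(word)) != len(word):
--           return False
--      vowels = ''
--      for vowel in 'aeouiy':
--           if vowel in word:
--                vowels += vowel
--      if len(vowels)==1:
--           return False
--      return True
-- ===== SOURCE B (Python) =====
-- def proper_first_word(word):
--     seen = set()
--     vowels = set()
--     for ch in word:
--         if ch in seen:
--             return False
--         seen.add(ch)
--         if ch in 'aeouiy':
--             vowels.add(ch)
--     return len(vowels) != 1
-- ===== Notes on version B (the rewrite author's own statement) =====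
-- stated objective: alternative
-- what changed: Fuses A's separate uniqueness-set build and fixed vowel-alphabet scan into one pass over the word with early exit on the first duplicate character, counting distinct vowels on the fly.
import Mathlib
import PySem

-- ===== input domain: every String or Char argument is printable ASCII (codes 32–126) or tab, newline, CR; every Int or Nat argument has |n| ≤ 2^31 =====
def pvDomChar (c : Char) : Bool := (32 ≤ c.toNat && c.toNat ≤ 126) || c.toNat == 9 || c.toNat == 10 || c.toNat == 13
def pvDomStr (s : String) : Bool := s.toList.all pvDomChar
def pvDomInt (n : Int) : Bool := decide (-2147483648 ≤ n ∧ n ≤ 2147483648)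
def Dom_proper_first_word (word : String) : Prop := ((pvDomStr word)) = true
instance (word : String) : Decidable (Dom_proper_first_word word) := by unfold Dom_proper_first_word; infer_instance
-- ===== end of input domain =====

-- B fuses A's separate uniqueness check and fixed vowel-alphabet scan into one pass over the
-- word with early exit on the first duplicate character (alternative decomposition, same cost).


-- ===== PORT A =====
-- 'vowel in word' for a single character is char membership in the string (exact).
def proper_first_word (word : String) : Bool :=
  if (PySem.Set.ofList word.toList).length ≠ word.toList.length then false
  else
    let vowels := "aeouiy".toList.foldl
      (fun acc v => if word.toList.contains v then acc ++ [v] else acc) ([] : List Char)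
    if vowels.length = 1 then false else true

-- ===== PORT B =====
def pfwLoop (cs : List Char) (seen vowels : PySem.Set Char) : Bool :=
  match cs with
  | [] => decide (vowels.length ≠ 1)
  | c :: rest =>
    if PySem.Set.contains seen c then false
    else pfwLoop rest (PySem.Set.add seen c)
      (if ("aeouiy".toList).contains c then PySem.Set.add vowels c else vowels)

def proper_first_word_alt (word : String) : Bool :=
  pfwLoop word.toList PySem.Set.empty PySem.Set.empty

-- ===== PRECONDITION & SPEC =====
def Spec_proper_first_word (word : String) (out : Bool) : Prop := out = proper_first_word_alt word
instance (word : String) (out : Bool) : Decidable (Spec_proper_first_word word out) := by unfold Spec_proper_first_word; infer_instance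

-- ===== CLAIM (what is proved, stated in full; the proofs are below) =====
def Claim_equal_proper_first_word : Prop := ∀ (word : String), Dom_proper_first_word word → Spec_proper_first_word word (proper_first_word word)

-- ===== LEMMAS AND PROOFS =====

-- if the word has a repeated character (or one already seen), B's loop returns False
theorem pfwLoop_dup (cs : List Char) : ∀ seen vs : PySem.Set Char,
    (¬ cs.Nodup ∨ ∃ c ∈ cs, c ∈ seen) → pfwLoop cs seen vs = false := by
  induction cs with
  | nil =>
    intro seen vs h
    rcases h with h | ⟨c, hc, _⟩
    · exact absurd List.nodup_nil h
    · cases hc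
  | cons c rest ih =>
    intro seen vs h
    by_cases hc : c ∈ seen
    · rw [pfwLoop, if_pos ((PySem.Set.contains_iff seen c).mpr hc)]
    · have hcon : PySem.Set.contains seen c = false := by
        simpa using (fun hh => hc ((PySem.Set.contains_iff seen c).mp hh))
      rw [pfwLoop, hcon, if_neg Bool.false_ne_true]
      apply ih
      rcases h with h | ⟨x, hx, hxs⟩
      · by_cases hr : rest.Nodup
        · have hcr : c ∈ rest := by
            by_contra hcr
            exact h (List.nodup_cons.mpr ⟨hcr, hr⟩)
          exact Or.inr ⟨c, hcr, by simp [PySem.Set.mem_add]⟩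
        · exact Or.inl hr
      · rcases List.mem_cons.mp hx with hx | hx
        · exact absurd hxs (by simpa [hx] using hc)
        · exact Or.inr ⟨x, hx, by simp [PySem.Set.mem_add, hxs]⟩

-- clean run: with no duplicates and fresh accumulators, B's loop counts vs ++ (vowels of cs)
theorem pfwLoop_clean (cs : List Char) : ∀ seen vs : PySem.Set Char,
    cs.Nodup → (∀ c ∈ cs, c ∉ seen) → (∀ c ∈ cs, c ∉ vs) →
    pfwLoop cs seen vs
      = decide ((vs ++ cs.filter (fun c => ("aeouiy".toList).contains c)).length ≠ 1) := by
  induction cs with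
  | nil => intro seen vs _ _ _; simp [pfwLoop]
  | cons c rest ih =>
    intro seen vs hnd hseen hvs
    have hc : c ∉ seen := hseen c (by simp)
    have hcon : PySem.Set.contains seen c = false := by
      simpa using (fun hh => hc ((PySem.Set.contains_iff seen c).mp hh))
    have hcr : c ∉ rest := (List.nodup_cons.mp hnd).1
    have hrest : rest.Nodup := (List.nodup_cons.mp hnd).2
    have hseen' : ∀ x ∈ rest, x ∉ PySem.Set.add seen c := by
      intro x hx hmem
      rcases (PySem.Set.mem_add (s := seen) (x := c) (y := x)).mp hmem with h | h
      · exact hseen x (by simp [hx]) h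
      · exact hcr (h ▸ hx)
    rw [pfwLoop, hcon, if_neg Bool.false_ne_true]
    by_cases hv : ("aeouiy".toList).contains c = true
    · have hvs' : ∀ x ∈ rest, x ∉ vs ++ [c] := by
        intro x hx hmem
        rcases List.mem_append.mp hmem with h | h
        · exact hvs x (by simp [hx]) h
        · exact hcr ((List.mem_singleton.mp h) ▸ hx)
      rw [if_pos hv, PySem.Set.add_of_not_mem (hvs c (by simp)),
        ih _ _ hrest hseen' hvs']
      have hlist : (vs ++ [c]) ++ List.filter (fun c => ("aeouiy".toList).contains c) rest
          = vs ++ List.filter (fun c => ("aeouiy".toList).contains c) (c :: rest) := by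
        rw [List.filter_cons, if_pos hv, List.append_assoc]
        rfl
      rw [hlist]
    · rw [if_neg hv, ih _ _ hrest hseen' (fun x hx => hvs x (by simp [hx]))]
      have hlist : List.filter (fun c => ("aeouiy".toList).contains c) rest
          = List.filter (fun c => ("aeouiy".toList).contains c) (c :: rest) := by
        rw [List.filter_cons, if_neg hv]
      rw [hlist]

-- the two filtered vowel lists have the same length (both enumerate the distinct vowels of l)
theorem vowel_count_eq (l : List Char) (hnd : l.Nodup) :
    (("aeouiy".toList.filter (fun v => l.contains v))).length
      = (l.filter (fun c => ("aeouiy".toList).contains c)).length := by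
  apply List.Perm.length_eq
  rw [List.perm_ext_iff_of_nodup
    (List.Nodup.filter _ (by decide)) (List.Nodup.filter _ hnd)]
  intro a
  simp [List.mem_filter, and_comm]

-- ===== VERDICT (by name: the statement is the Claim_ definition above) =====
theorem proper_first_word_spec : Claim_equal_proper_first_word := by
  intro word _
  unfold Spec_proper_first_word proper_first_word proper_first_word_alt
  set l := word.toList with hl
  by_cases hnd : l.Nodup
  · have hA : (PySem.Set.ofList l).length = l.length := by
      rw [PySem.Set.ofList_eq_self_of_nodup l hnd]
    rw [if_neg (by simpa using hA),
      pfwLoop_clean l _ _ hnd (by simp [PySem.Set.empty]) (by simp [PySem.Set.empty])]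
    rw [PySem.List.foldl_append_if_eq_filter]
    simp only [List.nil_append, PySem.Set.empty]
    have hlen := vowel_count_eq l hnd
    by_cases h1 : (l.filter (fun c => ("aeouiy".toList).contains c)).length = 1
    · rw [if_pos (hlen.trans h1)]
      simp only [ne_eq, h1]
      simp
    · rw [if_neg (fun hh => h1 (hlen.symm.trans hh))]
      simp only [ne_eq, h1]
      simp
  · have hB : pfwLoop l PySem.Set.empty PySem.Set.empty = false :=
      pfwLoop_dup l _ _ (Or.inl hnd)
    have hA : (PySem.Set.ofList l).length ≠ l.length := by
      intro heq
      apply hnd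
      have hfin : (PySem.Set.ofList l).toFinset = l.toFinset := by
        ext x
        simp [List.mem_toFinset, PySem.Set.mem_ofList]
      have hcard : l.toFinset.card = l.length := by
        rw [← hfin, List.toFinset_card_of_nodup (PySem.Set.nodup_ofList l), heq]
      exact Multiset.toFinset_card_eq_card_iff_nodup.mp hcard
    rw [if_pos hA, hB]
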